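-- pv_equiv track=rewrite | github.com/sipthesquares/Stargazer-numerology | stargazer_numerology_v2 (2).py | pythagorean_value
-- ===== SOURCE A (Python) =====
-- def pythagorean_value(name):
--     chart = {
--         **dict.fromkeys("AJS", 1), **dict.fromkeys("BKT", 2),
--         **dict.fromkeys("CLU", 3), **dict.fromkeys("DMV", 4),
--         **dict.fromkeys("ENW", 5), **dict.fromkeys("FOX", 6),
--         **dict.fromkeys("GPY", 7), **dict.fromkeys("HQZ", 8),
--         **dict.fromkeys("IR",  9),
--     }
--     return sum(chart.get(c.upper(), 0) for c in name if c.isalpha())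
-- ===== SOURCE B (Python) =====
-- def pythagorean_value(name):
--     # Stage 1: histogram of uppercased letters; Stage 2: weight each distinct
--     # letter by its closed-form value times its multiplicity (no chart dict).
--     counts = {}
--     for c in name:
--         if c.isalpha():
--             u = c.upper()
--             counts[u] = counts.get(u, 0) + 1
--     total = 0
--     for u, k in counts.items():
--         if len(u) == 1 and 'A' <= u <= 'Z':
--             total += ((ord(u) - 65) % 9 + 1) * k
--     return total
-- ===== Notes on version B (the rewrite author's own statement) =====
-- stated objective: alternative
-- what changed: Replaces A's chart-dict lookup-and-sum single pass by two stages: build a histogram of the uppercased alphabetic characters, then sum the closed-form letter value ((ord(u)-65)%9+1) times each distinct letter's multiplicity (no chart table).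
import Mathlib
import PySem

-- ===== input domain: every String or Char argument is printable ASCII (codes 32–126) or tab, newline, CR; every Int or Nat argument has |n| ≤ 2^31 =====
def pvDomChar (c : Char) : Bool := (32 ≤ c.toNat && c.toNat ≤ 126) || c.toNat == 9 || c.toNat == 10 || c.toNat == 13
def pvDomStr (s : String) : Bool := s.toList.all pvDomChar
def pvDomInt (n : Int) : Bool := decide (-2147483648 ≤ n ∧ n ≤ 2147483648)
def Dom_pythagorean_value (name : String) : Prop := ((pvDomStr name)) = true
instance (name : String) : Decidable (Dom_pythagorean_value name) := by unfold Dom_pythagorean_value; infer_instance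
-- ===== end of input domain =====

set_option maxRecDepth 4096


-- B drops A's chart dict and single summing pass for a two-stage computation: a histogram of
-- uppercased letters, then a weighted sum (closed-form letter value × multiplicity) over the
-- distinct letters. Same cost; no chart table.

-- ===== PORT A =====
-- A-side helper: the chart dict built by merging dict.fromkeys of each letter group, in order.
def pyChart : PySem.Dict Char Int :=
  let chart := "AJS".toList.foldl (fun d c => d.insert c 1) PySem.Dict.empty
  let chart := "BKT".toList.foldl (fun d c => d.insert c 2) chart
  let chart := "CLU".toList.foldl (fun d c => d.insert c 3) chart
  let chart := "DMV".toList.foldl (fun d c => d.insert c 4) chart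
  let chart := "ENW".toList.foldl (fun d c => d.insert c 5) chart
  let chart := "FOX".toList.foldl (fun d c => d.insert c 6) chart
  let chart := "GPY".toList.foldl (fun d c => d.insert c 7) chart
  let chart := "HQZ".toList.foldl (fun d c => d.insert c 8) chart
  "IR".toList.foldl (fun d c => d.insert c 9) chart

def pythagorean_value (name : String) : Int :=
  name.toList.foldl
    (fun acc c =>
      if PySem.Chars.isalpha c then acc + pyChart.getD (PySem.Chars.upperChar c) 0 else acc)
    0

-- ===== PORT B =====
-- upperChar models the single-character c.upper(); exact on the ASCII domain, where u is always
-- one character, so Source B's `len(u) == 1 and 'A' <= u <= 'Z'` guard is the range check below.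
def pythagorean_value_alt (name : String) : Int :=
  let counts := name.toList.foldl
    (fun counts c =>
      if PySem.Chars.isalpha c then
        let u := PySem.Chars.upperChar c
        counts.insert u (counts.getD u 0 + 1)
      else counts)
    PySem.Dict.empty
  counts.items.foldl
    (fun total p =>
      if 'A' ≤ p.1 ∧ p.1 ≤ 'Z' then total + (((p.1.toNat - 65) % 9 + 1 : Nat) : Int) * p.2
      else total)
    0

-- ===== PRECONDITION & SPEC =====
def Spec_pythagorean_value (name : String) (out : Int) : Prop := out = pythagorean_value_alt name
instance (name : String) (out : Int) : Decidable (Spec_pythagorean_value name out) := by unfold Spec_pythagorean_value; infer_instance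

-- ===== CLAIM =====
def Claim_equal_pythagorean_value : Prop := ∀ (name : String), Dom_pythagorean_value name → Spec_pythagorean_value name (pythagorean_value name)

-- ===== LEMMAS AND PROOFS =====

-- the closed-form letter value used by B
def pvW (u : Char) : Int := (((u.toNat - 65) % 9 + 1 : Nat) : Int)

-- per-character facts, checked by evaluation over all 127 relevant code points
lemma pv_char_check : ∀ n : Nat, n < 127 →
    ((!pvDomChar (Char.ofNat n)) || (!PySem.Chars.isalpha (Char.ofNat n)) ||
      (decide ('A' ≤ PySem.Chars.upperChar (Char.ofNat n) ∧ PySem.Chars.upperChar (Char.ofNat n) ≤ 'Z')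
        && (pyChart.getD (PySem.Chars.upperChar (Char.ofNat n)) 0 == pvW (PySem.Chars.upperChar (Char.ofNat n))))) = true := by
  decide

lemma pv_char_facts (c : Char) (hd : pvDomChar c = true) (ha : PySem.Chars.isalpha c = true) :
    ('A' ≤ PySem.Chars.upperChar c ∧ PySem.Chars.upperChar c ≤ 'Z')
      ∧ pyChart.getD (PySem.Chars.upperChar c) 0 = pvW (PySem.Chars.upperChar c) := by
  have hn : c.toNat < 127 := by
    simp [pvDomChar, Bool.or_eq_true, Bool.and_eq_true, decide_eq_true_eq, beq_iff_eq] at hd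
    omega
  have h := pv_char_check c.toNat hn
  rw [c.ofNat_toNat] at h
  simp [hd, ha, Bool.and_eq_true, decide_eq_true_eq, beq_iff_eq] at h
  exact ⟨h.1, h.2⟩

-- A's fold is the sum of the closed-form values over the uppercased alphabetic characters
lemma pv_A_fold (l : List Char) (hdom : l.all pvDomChar = true) : ∀ acc : Int,
    l.foldl
      (fun acc c =>
        if PySem.Chars.isalpha c then acc + pyChart.getD (PySem.Chars.upperChar c) 0 else acc)
      acc
    = acc + (((l.filter PySem.Chars.isalpha).map PySem.Chars.upperChar).map pvW).sum := by
  induction l with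
  | nil => intro acc; simp
  | cons c t ih =>
    intro acc
    simp only [List.all_cons, Bool.and_eq_true] at hdom
    by_cases ha : PySem.Chars.isalpha c = true
    · have hw := (pv_char_facts c hdom.1 ha).2
      simp only [List.foldl_cons, List.filter_cons, ha, if_pos, List.map_cons, List.sum_cons]
      rw [ih hdom.2, hw]
      ring
    · simp only [List.foldl_cons, List.filter_cons, ha]
      simp only [Bool.false_eq_true, if_false]
      exact ih hdom.2 acc

-- B's first loop is the plain counting loop over the filtered-and-uppercased list
lemma pv_B_counts (l : List Char) : ∀ d : PySem.Dict Char Int,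
    l.foldl
      (fun counts c =>
        if PySem.Chars.isalpha c then
          let u := PySem.Chars.upperChar c
          counts.insert u (counts.getD u 0 + 1)
        else counts)
      d
    = ((l.filter PySem.Chars.isalpha).map PySem.Chars.upperChar).foldl
        (fun d u => d.insert u (d.getD u 0 + 1)) d := by
  induction l with
  | nil => intro d; rfl
  | cons c t ih =>
    intro d
    by_cases ha : PySem.Chars.isalpha c = true
    · simp only [List.foldl_cons, List.filter_cons, ha, if_pos, List.map_cons]
      exact ih _
    · simp only [List.foldl_cons, List.filter_cons, ha]
      simp only [Bool.false_eq_true, if_false]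
      exact ih d

-- B's second loop over (k, cnt k) pairs whose keys all pass the range test is a weighted sum
lemma pv_B_items (cnt : Char → Int) : ∀ (L : List Char), (∀ k ∈ L, 'A' ≤ k ∧ k ≤ 'Z') → ∀ acc : Int,
    (L.map (fun k => (k, cnt k))).foldl
      (fun total p =>
        if 'A' ≤ p.1 ∧ p.1 ≤ 'Z' then total + (((p.1.toNat - 65) % 9 + 1 : Nat) : Int) * p.2
        else total)
      acc
    = acc + (L.map (fun k => pvW k * cnt k)).sum := by
  intro L
  induction L with
  | nil => intro _ acc; simp
  | cons k t ih =>
    intro hmem acc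
    simp only [List.map_cons, List.foldl_cons, List.sum_cons]
    rw [if_pos (hmem k (List.mem_cons_self))]
    rw [ih (fun x hx => hmem x (List.mem_cons_of_mem _ hx))]
    show acc + pvW k * cnt k + _ = _
    ring

-- summing a weight over the distinct elements with multiplicities equals summing over the list
lemma pv_count_sum (m : List Char) :
    ((PySem.Set.ofList m).map (fun x => pvW x * (m.count x : Int))).sum = (m.map pvW).sum := by
  have hnd := PySem.Set.nodup_ofList m
  have h1 := List.sum_toFinset (fun x => pvW x * (m.count x : Int)) hnd
  have h2 : (PySem.Set.ofList m).toFinset = m.toFinset := by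
    ext a; simp [PySem.Set.mem_ofList]
  have h3 := Finset.sum_list_map_count m pvW
  rw [← h1, h2, h3]
  apply Finset.sum_congr rfl
  intro x _
  simp [mul_comm]

-- ===== VERDICT =====
theorem pythagorean_value_spec : Claim_equal_pythagorean_value := by
  intro name hdom
  unfold Spec_pythagorean_value pythagorean_value pythagorean_value_alt
  dsimp only
  set l := name.toList with hl
  have hall : l.all pvDomChar = true := hdom
  set m := (l.filter PySem.Chars.isalpha).map PySem.Chars.upperChar with hm
  have hrange : ∀ k ∈ PySem.Set.ofList m, 'A' ≤ k ∧ k ≤ 'Z' := by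
    intro k hk
    rw [PySem.Set.mem_ofList] at hk
    obtain ⟨c, hc, rfl⟩ := List.mem_map.mp hk
    have hc' := List.mem_filter.mp hc
    exact (pv_char_facts c (List.all_eq_true.mp hall c hc'.1) hc'.2).1
  rw [pv_A_fold l hall 0, pv_B_counts l PySem.Dict.empty,
    PySem.Dict.foldl_insert_getD_add_one_eq_counter, PySem.Dict.items_counter,
    pv_B_items (fun k => (m.count k : Int)) (PySem.Set.ofList m) hrange 0,
    pv_count_sum m]
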